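-- pv_equiv track=rewrite | github.com/pypi-data/pypi-mirror-336 | packages/lightem/lightem-0.0.23.tar.gz/lightem-0.0.23/lightem/modules/Embedder.py | __preprocessSentence
-- ===== SOURCE A (Python) =====
-- def __preprocessSentence(sentence: str, removeStopwords) -> str:
--   '''Remove stopwords, caracteres da sentença e deixa tudo em minúsculo.'''
--   if removeStopwords:
--     words = sentence.split()
--     # words = [word for word in words if word not in self.stopwords]
--     sentence = " ".join(words)
--   specialChars = ['.', ',', '!', '?', ';', ':', '(', ')', '[', ']', '{', '}', '"', "'"]
--   for char in specialChars:
--     sentence = sentence.replace(char, ' ')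
--
--   return sentence.lower()
-- ===== SOURCE B (Python) =====
-- def __preprocessSentence(sentence: str, removeStopwords) -> str:
--   '''Remove stopwords, caracteres da sentenca e deixa tudo em minusculo.'''
--   if removeStopwords:
--     sentence = " ".join(sentence.split())
--   special = set('.,!?;:()[]{}"\'')
--   return "".join(' ' if c in special else c for c in sentence).lower()
-- ===== Notes on version B (the rewrite author's own statement) =====
-- stated objective: alternative
-- what changed: Replaces the 14-iteration replace loop (14 full scans each building an intermediate string) with one single pass over the characters using a set membership test, keeping the split/join stopword branch; asymptotically one pass instead of 14, though CPython's C-level str.replace makes A faster in practice.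
import Mathlib
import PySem

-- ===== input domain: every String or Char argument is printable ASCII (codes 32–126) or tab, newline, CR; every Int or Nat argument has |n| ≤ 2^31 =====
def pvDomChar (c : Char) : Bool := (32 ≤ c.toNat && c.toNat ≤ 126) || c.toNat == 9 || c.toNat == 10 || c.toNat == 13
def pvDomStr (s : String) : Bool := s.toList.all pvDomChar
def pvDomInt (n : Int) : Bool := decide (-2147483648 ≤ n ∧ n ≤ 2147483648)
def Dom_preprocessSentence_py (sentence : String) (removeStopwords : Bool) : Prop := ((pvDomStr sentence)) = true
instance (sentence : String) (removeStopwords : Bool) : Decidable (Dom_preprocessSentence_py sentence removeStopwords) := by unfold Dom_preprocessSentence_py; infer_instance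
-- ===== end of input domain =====

-- B replaces A's 14-iteration replace loop (14 full passes over the string) by one
-- single pass with a set membership test (an alternative decomposition, not measured
-- faster); the stopword branch (split/join) is kept.

-- ===== PORT A =====
def preprocessSentence_py (sentence : String) (removeStopwords : Bool) : String :=
  let sentence := if removeStopwords then PySem.Str.join " " (PySem.Str.split₀ sentence) else sentence
  let specialChars : List String := [".", ",", "!", "?", ";", ":", "(", ")", "[", "]", "{", "}", "\"", "'"]
  let sentence := specialChars.foldl (fun s ch => PySem.Str.replace s ch " ") sentence
  PySem.Str.lower sentence

-- ===== PORT B =====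
def pvSpecialSet : PySem.Set Char := PySem.Set.ofList ['.', ',', '!', '?', ';', ':', '(', ')', '[', ']', '{', '}', '"', '\'']

def preprocessSentence_py_alt (sentence : String) (removeStopwords : Bool) : String :=
  let sentence := if removeStopwords then PySem.Str.join " " (PySem.Str.split₀ sentence) else sentence
  -- ''.join(' ' if c in special else c for c in sentence): exact as String.ofList of the mapped char list
  PySem.Str.lower (String.ofList (sentence.toList.map (fun c => if PySem.Set.contains pvSpecialSet c then ' ' else c)))

-- ===== PRECONDITION & SPEC =====
def Spec_preprocessSentence_py (sentence : String) (removeStopwords : Bool) (out : String) : Prop := out = preprocessSentence_py_alt sentence removeStopwords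
instance (sentence : String) (removeStopwords : Bool) (out : String) : Decidable (Spec_preprocessSentence_py sentence removeStopwords out) := by unfold Spec_preprocessSentence_py; infer_instance

-- ===== CLAIM (what is proved, stated in full; the proofs are below) =====
def Claim_equal_preprocessSentence_py : Prop := ∀ (sentence : String) (removeStopwords : Bool), Dom_preprocessSentence_py sentence removeStopwords → Spec_preprocessSentence_py sentence removeStopwords (preprocessSentence_py sentence removeStopwords)

-- ===== LEMMAS AND PROOFS =====

-- replace.go with single-char pattern and enough fuel is a map
lemma replace_go_single (ch : Char) : ∀ (fuel : Nat) (l acc : List Char), l.length ≤ fuel →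
    PySem.Chars.replace.go [ch] [' '] fuel l acc
      = acc.reverse ++ l.map (fun c => if c = ch then ' ' else c) := by
  intro fuel
  induction fuel with
  | zero =>
    intro l acc h
    have : l = [] := List.length_eq_zero_iff.mp (Nat.le_zero.mp h)
    subst this
    simp [PySem.Chars.replace.go]
  | succ n ih =>
    intro l acc h
    cases l with
    | nil => simp [PySem.Chars.replace.go]
    | cons c t =>
      rw [PySem.Chars.replace.go]
      by_cases hc : c = ch
      · subst hc
        have hp : List.isPrefixOf [c] (c :: t) = true := by
          simp [List.isPrefixOf]
        simp only [hp, if_pos]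
        have hd : List.drop [c].length (c :: t) = t := rfl
        rw [hd, ih t ([' '].reverse ++ acc) (by simpa using Nat.le_of_succ_le_succ h)]
        simp
      · have hp : List.isPrefixOf [ch] (c :: t) = false := by
          simp [List.isPrefixOf]
          intro h'; exact absurd h'.symm hc
        simp only [hp]
        rw [ih t (c :: acc) (by simpa using Nat.le_of_succ_le_succ h)]
        simp [hc]

lemma replace_single (ch : Char) (cs : List Char) :
    PySem.Chars.replace cs [ch] [' '] = cs.map (fun c => if c = ch then ' ' else c) := by
  rw [PySem.Chars.replace]
  simp [replace_go_single ch cs.length cs [] (le_refl _)]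

-- folding single-char replaces over a list of special chars = one map
lemma fold_replace (L : List Char) (hsp : ' ' ∉ L) : ∀ (cs : List Char),
    L.foldl (fun s ch => PySem.Chars.replace s [ch] [' ']) cs
      = cs.map (fun c => if c ∈ L then ' ' else c) := by
  induction L with
  | nil => intro cs; simp
  | cons ch L ih =>
    intro cs
    have hsp' : ' ' ∉ L := fun h => hsp (List.mem_cons_of_mem _ h)
    have hne : ' ' ≠ ch := fun h => hsp (h ▸ List.mem_cons_self)
    simp only [List.foldl_cons]
    rw [replace_single, ih hsp', List.map_map]
    apply List.map_congr_left
    intro c _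
    by_cases hc : c = ch
    · subst hc
      simp
    · simp [hc, Function.comp]

-- the String-level foldl over the singleton-string list matches the Chars-level foldl
lemma str_fold (L : List Char) : ∀ (s : String),
    ((L.map (fun ch => String.ofList [ch])).foldl (fun s ch => PySem.Str.replace s ch " ") s).toList
      = L.foldl (fun cs ch => PySem.Chars.replace cs [ch] [' ']) s.toList := by
  induction L with
  | nil => intro s; simp
  | cons ch L ih =>
    intro s
    simp only [List.map_cons, List.foldl_cons]
    rw [ih]
    congr 1
    simp [PySem.Str.toList_replace]

-- ===== VERDICT (by name: the statement is the Claim_ definition above) =====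
theorem preprocessSentence_py_spec : Claim_equal_preprocessSentence_py := by
  intro sentence removeStopwords _
  unfold Spec_preprocessSentence_py preprocessSentence_py preprocessSentence_py_alt
  apply String.toList_inj.mp
  set s1 : String := if removeStopwords then PySem.Str.join " " (PySem.Str.split₀ sentence) else sentence with hs1
  have hlist : ([".", ",", "!", "?", ";", ":", "(", ")", "[", "]", "{", "}", "\"", "'"] : List String)
      = (['.', ',', '!', '?', ';', ':', '(', ')', '[', ']', '{', '}', '"', '\''] : List Char).map (fun ch => String.ofList [ch]) := by
    decide
  simp only [hlist]
  rw [PySem.Str.toList_lower, PySem.Str.toList_lower, str_fold]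
  rw [fold_replace _ (by decide)]
  rw [String.toList_ofList]
  congr 1
  apply List.map_congr_left
  intro c _
  have hcc : (PySem.Set.contains pvSpecialSet c = true) ↔ c ∈ (['.', ',', '!', '?', ';', ':', '(', ')', '[', ']', '{', '}', '"', '\''] : List Char) := by
    rw [PySem.Set.contains_iff, pvSpecialSet, PySem.Set.mem_ofList]
  by_cases hm : c ∈ (['.', ',', '!', '?', ';', ':', '(', ')', '[', ']', '{', '}', '"', '\''] : List Char)
  · rw [if_pos hm, if_pos (hcc.mpr hm)]
  · rw [if_neg hm, if_neg (fun h => hm (hcc.mp h))]
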